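-- pv_equiv track=rewrite | github.com/jerryxfu/medive | modules/evaluator.py | sort_classes_by_body_system
-- ===== SOURCE A (Python) =====
-- from typing import Dict, List, Optional, Any
--
-- def sort_classes_by_body_system(unique_labels: List[int], class_names: List[str]) -> List[int]:
--     """
--     Sort class labels by body system/medical category.
--     Groups related conditions together (heart, respiratory, neurological, etc.)
--     """
--     # Define medical system categories with keywords
--     system_categories = {
--         'cardiovascular': ['heart', 'cardiac', 'cardio', 'blood pressure', 'hypertension', 'hypotension',
--                            'arrhythmia', 'tachycardia', 'bradycardia', 'myocardial', 'angina', 'coronary',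
--                            'circulation', 'vascular', 'valve', 'aortic', 'mitral'],
--
--         'respiratory': ['lung', 'respiratory', 'breathing', 'asthma', 'pneumonia', 'bronchitis',
--                         'copd', 'tuberculosis', 'cough', 'dyspnea', 'shortness of breath',
--                         'pulmonary', 'bronchial', 'chest congestion'],
--
--         'neurological': ['brain', 'nerve', 'neurological', 'stroke', 'seizure', 'epilepsy',
--                          'migraine', 'headache', 'dementia', 'alzheimer', 'parkinson',
--                          'multiple sclerosis', 'paralysis', 'neuropathy'],
--
--         'gastrointestinal': ['stomach', 'intestinal', 'digestive', 'gastro', 'bowel', 'colon',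
--                              'diarrhea', 'constipation', 'nausea', 'vomiting', 'ulcer',
--                              'hepatitis', 'liver', 'gallbladder', 'pancreatic'],
--
--         'musculoskeletal': ['bone', 'joint', 'muscle', 'arthritis', 'fracture', 'osteoporosis',
--                             'back pain', 'spine', 'tendon', 'ligament', 'rheumatoid',
--                             'fibromyalgia', 'muscular'],
--
--         'endocrine': ['diabetes', 'thyroid', 'hormone', 'insulin', 'glucose', 'metabolic',
--                       'endocrine', 'adrenal', 'pituitary', 'hypoglycemia', 'hyperglycemia'],
--
--         'infectious': ['infection', 'bacterial', 'viral', 'fungal', 'flu', 'influenza',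
--                        'cold', 'fever', 'sepsis', 'pneumonia', 'meningitis', 'malaria'],
--
--         'dermatological': ['skin', 'rash', 'dermatitis', 'eczema', 'psoriasis', 'acne',
--                            'burn', 'wound', 'ulcer', 'melanoma', 'dermatological'],
--
--         'psychiatric': ['depression', 'anxiety', 'bipolar', 'schizophrenia', 'ptsd',
--                         'panic', 'psychiatric', 'mental health', 'mood disorder'],
--
--         'genitourinary': ['kidney', 'bladder', 'urinary', 'renal', 'prostate', 'urethral',
--                           'incontinence', 'uti', 'nephritis', 'cystitis'],
--
--         'reproductive': ['pregnancy', 'menstrual', 'ovarian', 'uterine', 'breast',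
--                          'reproductive', 'gynecological', 'erectile', 'fertility'],
--
--         'ophthalmologic': ['eye', 'vision', 'glaucoma', 'cataract', 'retinal', 'optic',
--                            'blindness', 'ophthalmologic', 'visual'],
--
--         'otolaryngologic': ['ear', 'nose', 'throat', 'hearing', 'tinnitus', 'sinusitis',
--                             'otitis', 'laryngitis', 'pharyngitis']
--     }
--
--     def categorize_condition(name: str) -> str:
--         name_lower = name.lower()
--         for system, keywords in system_categories.items():
--             if any(keyword in name_lower for keyword in keywords):
--                 return system
--         return 'other'  # For conditions that don't match any category
--
--     # Create pairs with category, then sort by category and within category alphabetically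
--     categorized_pairs = []
--     for label in unique_labels:
--         name = class_names[label]
--         category = categorize_condition(name)
--         categorized_pairs.append((category, name.lower(), label))
--
--     # Sort by category first, then alphabetically within category
--     categorized_pairs.sort(key=lambda x: (x[0], x[1]))
--
--     return [pair[2] for pair in categorized_pairs]
-- ===== SOURCE B (Python) =====
-- from typing import List
--
-- # Flat (keyword, category) scan list in the same category-major first-match order
-- # as the original nested table; scanning it left to right gives the same category.
-- KEYWORD_CATEGORIES = [
--     ('heart', 'cardiovascular'),
--     ('cardiac', 'cardiovascular'),
--     ('cardio', 'cardiovascular'),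
--     ('blood pressure', 'cardiovascular'),
--     ('hypertension', 'cardiovascular'),
--     ('hypotension', 'cardiovascular'),
--     ('arrhythmia', 'cardiovascular'),
--     ('tachycardia', 'cardiovascular'),
--     ('bradycardia', 'cardiovascular'),
--     ('myocardial', 'cardiovascular'),
--     ('angina', 'cardiovascular'),
--     ('coronary', 'cardiovascular'),
--     ('circulation', 'cardiovascular'),
--     ('vascular', 'cardiovascular'),
--     ('valve', 'cardiovascular'),
--     ('aortic', 'cardiovascular'),
--     ('mitral', 'cardiovascular'),
--     ('lung', 'respiratory'),
--     ('respiratory', 'respiratory'),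
--     ('breathing', 'respiratory'),
--     ('asthma', 'respiratory'),
--     ('pneumonia', 'respiratory'),
--     ('bronchitis', 'respiratory'),
--     ('copd', 'respiratory'),
--     ('tuberculosis', 'respiratory'),
--     ('cough', 'respiratory'),
--     ('dyspnea', 'respiratory'),
--     ('shortness of breath', 'respiratory'),
--     ('pulmonary', 'respiratory'),
--     ('bronchial', 'respiratory'),
--     ('chest congestion', 'respiratory'),
--     ('brain', 'neurological'),
--     ('nerve', 'neurological'),
--     ('neurological', 'neurological'),
--     ('stroke', 'neurological'),
--     ('seizure', 'neurological'),
--     ('epilepsy', 'neurological'),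
--     ('migraine', 'neurological'),
--     ('headache', 'neurological'),
--     ('dementia', 'neurological'),
--     ('alzheimer', 'neurological'),
--     ('parkinson', 'neurological'),
--     ('multiple sclerosis', 'neurological'),
--     ('paralysis', 'neurological'),
--     ('neuropathy', 'neurological'),
--     ('stomach', 'gastrointestinal'),
--     ('intestinal', 'gastrointestinal'),
--     ('digestive', 'gastrointestinal'),
--     ('gastro', 'gastrointestinal'),
--     ('bowel', 'gastrointestinal'),
--     ('colon', 'gastrointestinal'),
--     ('diarrhea', 'gastrointestinal'),
--     ('constipation', 'gastrointestinal'),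
--     ('nausea', 'gastrointestinal'),
--     ('vomiting', 'gastrointestinal'),
--     ('ulcer', 'gastrointestinal'),
--     ('hepatitis', 'gastrointestinal'),
--     ('liver', 'gastrointestinal'),
--     ('gallbladder', 'gastrointestinal'),
--     ('pancreatic', 'gastrointestinal'),
--     ('bone', 'musculoskeletal'),
--     ('joint', 'musculoskeletal'),
--     ('muscle', 'musculoskeletal'),
--     ('arthritis', 'musculoskeletal'),
--     ('fracture', 'musculoskeletal'),
--     ('osteoporosis', 'musculoskeletal'),
--     ('back pain', 'musculoskeletal'),
--     ('spine', 'musculoskeletal'),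
--     ('tendon', 'musculoskeletal'),
--     ('ligament', 'musculoskeletal'),
--     ('rheumatoid', 'musculoskeletal'),
--     ('fibromyalgia', 'musculoskeletal'),
--     ('muscular', 'musculoskeletal'),
--     ('diabetes', 'endocrine'),
--     ('thyroid', 'endocrine'),
--     ('hormone', 'endocrine'),
--     ('insulin', 'endocrine'),
--     ('glucose', 'endocrine'),
--     ('metabolic', 'endocrine'),
--     ('endocrine', 'endocrine'),
--     ('adrenal', 'endocrine'),
--     ('pituitary', 'endocrine'),
--     ('hypoglycemia', 'endocrine'),
--     ('hyperglycemia', 'endocrine'),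
--     ('infection', 'infectious'),
--     ('bacterial', 'infectious'),
--     ('viral', 'infectious'),
--     ('fungal', 'infectious'),
--     ('flu', 'infectious'),
--     ('influenza', 'infectious'),
--     ('cold', 'infectious'),
--     ('fever', 'infectious'),
--     ('sepsis', 'infectious'),
--     ('pneumonia', 'infectious'),
--     ('meningitis', 'infectious'),
--     ('malaria', 'infectious'),
--     ('skin', 'dermatological'),
--     ('rash', 'dermatological'),
--     ('dermatitis', 'dermatological'),
--     ('eczema', 'dermatological'),
--     ('psoriasis', 'dermatological'),
--     ('acne', 'dermatological'),
--     ('burn', 'dermatological'),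
--     ('wound', 'dermatological'),
--     ('ulcer', 'dermatological'),
--     ('melanoma', 'dermatological'),
--     ('dermatological', 'dermatological'),
--     ('depression', 'psychiatric'),
--     ('anxiety', 'psychiatric'),
--     ('bipolar', 'psychiatric'),
--     ('schizophrenia', 'psychiatric'),
--     ('ptsd', 'psychiatric'),
--     ('panic', 'psychiatric'),
--     ('psychiatric', 'psychiatric'),
--     ('mental health', 'psychiatric'),
--     ('mood disorder', 'psychiatric'),
--     ('kidney', 'genitourinary'),
--     ('bladder', 'genitourinary'),
--     ('urinary', 'genitourinary'),
--     ('renal', 'genitourinary'),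
--     ('prostate', 'genitourinary'),
--     ('urethral', 'genitourinary'),
--     ('incontinence', 'genitourinary'),
--     ('uti', 'genitourinary'),
--     ('nephritis', 'genitourinary'),
--     ('cystitis', 'genitourinary'),
--     ('pregnancy', 'reproductive'),
--     ('menstrual', 'reproductive'),
--     ('ovarian', 'reproductive'),
--     ('uterine', 'reproductive'),
--     ('breast', 'reproductive'),
--     ('reproductive', 'reproductive'),
--     ('gynecological', 'reproductive'),
--     ('erectile', 'reproductive'),
--     ('fertility', 'reproductive'),
--     ('eye', 'ophthalmologic'),
--     ('vision', 'ophthalmologic'),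
--     ('glaucoma', 'ophthalmologic'),
--     ('cataract', 'ophthalmologic'),
--     ('retinal', 'ophthalmologic'),
--     ('optic', 'ophthalmologic'),
--     ('blindness', 'ophthalmologic'),
--     ('ophthalmologic', 'ophthalmologic'),
--     ('visual', 'ophthalmologic'),
--     ('ear', 'otolaryngologic'),
--     ('nose', 'otolaryngologic'),
--     ('throat', 'otolaryngologic'),
--     ('hearing', 'otolaryngologic'),
--     ('tinnitus', 'otolaryngologic'),
--     ('sinusitis', 'otolaryngologic'),
--     ('otitis', 'otolaryngologic'),
--     ('laryngitis', 'otolaryngologic'),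
--     ('pharyngitis', 'otolaryngologic'),
-- ]
--
--
-- def _category(name_lower: str) -> str:
--     for keyword, category in KEYWORD_CATEGORIES:
--         if keyword in name_lower:
--             return category
--     return 'other'
--
--
-- def sort_classes_by_body_system(unique_labels: List[int], class_names: List[str]) -> List[int]:
--     """Group-then-locally-sort: bucket labels by medical category (found by a flat
--     keyword scan), then emit categories alphabetically, each bucket stable-sorted
--     by lowercased name."""
--     buckets = {}
--     for label in unique_labels:
--         name_lower = class_names[label].lower()
--         buckets.setdefault(_category(name_lower), []).append((name_lower, label))
--     out = []
--     for category in sorted(buckets):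
--         out.extend(label for _, label in sorted(buckets[category], key=lambda p: p[0]))
--     return out
-- ===== Notes on version B (the rewrite author's own statement) =====
-- stated objective: alternative
-- what changed: A sorts all labels once with a composite (category, lowercased-name) key after a nested category->keywords table scan; B instead scans one flat (keyword, category) pair list for the category, buckets labels per category in a dict in one pass, then emits categories in alphabetical key order with each bucket sorted by lowercased name alone.
import Mathlib
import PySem

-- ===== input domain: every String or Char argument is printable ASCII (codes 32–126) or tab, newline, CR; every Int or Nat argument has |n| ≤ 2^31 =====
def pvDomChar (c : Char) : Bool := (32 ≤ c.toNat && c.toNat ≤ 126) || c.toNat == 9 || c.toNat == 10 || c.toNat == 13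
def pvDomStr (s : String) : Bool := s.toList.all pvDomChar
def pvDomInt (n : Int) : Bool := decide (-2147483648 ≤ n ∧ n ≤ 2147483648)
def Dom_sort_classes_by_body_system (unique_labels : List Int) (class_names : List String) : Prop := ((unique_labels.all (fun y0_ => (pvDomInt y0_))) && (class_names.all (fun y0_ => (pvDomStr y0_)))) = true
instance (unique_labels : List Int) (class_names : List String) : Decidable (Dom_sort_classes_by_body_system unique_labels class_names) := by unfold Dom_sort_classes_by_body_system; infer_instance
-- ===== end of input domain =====

-- B replaces A's single composite-key (category, name) sort by a group-then-locally-sort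
-- decomposition over a dict of buckets, and A's nested category→keywords table by a flat
-- (keyword, category) scan list (objective: alternative decomposition, same cost).

-- ===== PORT A =====
-- A's module constant: the category→keywords table, in dict insertion order
def systemCategories : List (String × List String) :=
  [("cardiovascular", ["heart", "cardiac", "cardio", "blood pressure", "hypertension", "hypotension", "arrhythmia", "tachycardia", "bradycardia", "myocardial", "angina", "coronary", "circulation", "vascular", "valve", "aortic", "mitral"]),
   ("respiratory", ["lung", "respiratory", "breathing", "asthma", "pneumonia", "bronchitis", "copd", "tuberculosis", "cough", "dyspnea", "shortness of breath", "pulmonary", "bronchial", "chest congestion"]),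
   ("neurological", ["brain", "nerve", "neurological", "stroke", "seizure", "epilepsy", "migraine", "headache", "dementia", "alzheimer", "parkinson", "multiple sclerosis", "paralysis", "neuropathy"]),
   ("gastrointestinal", ["stomach", "intestinal", "digestive", "gastro", "bowel", "colon", "diarrhea", "constipation", "nausea", "vomiting", "ulcer", "hepatitis", "liver", "gallbladder", "pancreatic"]),
   ("musculoskeletal", ["bone", "joint", "muscle", "arthritis", "fracture", "osteoporosis", "back pain", "spine", "tendon", "ligament", "rheumatoid", "fibromyalgia", "muscular"]),
   ("endocrine", ["diabetes", "thyroid", "hormone", "insulin", "glucose", "metabolic", "endocrine", "adrenal", "pituitary", "hypoglycemia", "hyperglycemia"]),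
   ("infectious", ["infection", "bacterial", "viral", "fungal", "flu", "influenza", "cold", "fever", "sepsis", "pneumonia", "meningitis", "malaria"]),
   ("dermatological", ["skin", "rash", "dermatitis", "eczema", "psoriasis", "acne", "burn", "wound", "ulcer", "melanoma", "dermatological"]),
   ("psychiatric", ["depression", "anxiety", "bipolar", "schizophrenia", "ptsd", "panic", "psychiatric", "mental health", "mood disorder"]),
   ("genitourinary", ["kidney", "bladder", "urinary", "renal", "prostate", "urethral", "incontinence", "uti", "nephritis", "cystitis"]),
   ("reproductive", ["pregnancy", "menstrual", "ovarian", "uterine", "breast", "reproductive", "gynecological", "erectile", "fertility"]),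
   ("ophthalmologic", ["eye", "vision", "glaucoma", "cataract", "retinal", "optic", "blindness", "ophthalmologic", "visual"]),
   ("otolaryngologic", ["ear", "nose", "throat", "hearing", "tinnitus", "sinusitis", "otitis", "laryngitis", "pharyngitis"])]

-- categorize_condition: first category whose keyword list has a hit in name.lower(), else 'other'
def categorizeCondition (name : String) : String :=
  let nameLower := PySem.Str.lower name
  match systemCategories.find? (fun p => p.2.any (fun kw => PySem.Str.isIn kw nameLower)) with
  | some p => p.1
  | none => "other"

-- class_names[label]: IndexError excluded by Pre_, so pyGetD is exact there
def sort_classes_by_body_system (unique_labels : List Int) (class_names : List String) : List Int :=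
  let categorizedPairs := unique_labels.map (fun label =>
    let name := PySem.List.pyGetD class_names label ""
    (categorizeCondition name, PySem.Str.lower name, label))
  (PySem.List.sorted2 categorizedPairs (fun p => p.1) (fun p => p.2.1)).map (fun p => p.2.2)

-- ===== PORT B =====
-- B's module constant: the flat (keyword, category) scan list, category-major first-match order
def keywordPairs : List (String × String) :=
  [("heart", "cardiovascular"),
   ("cardiac", "cardiovascular"),
   ("cardio", "cardiovascular"),
   ("blood pressure", "cardiovascular"),
   ("hypertension", "cardiovascular"),
   ("hypotension", "cardiovascular"),
   ("arrhythmia", "cardiovascular"),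
   ("tachycardia", "cardiovascular"),
   ("bradycardia", "cardiovascular"),
   ("myocardial", "cardiovascular"),
   ("angina", "cardiovascular"),
   ("coronary", "cardiovascular"),
   ("circulation", "cardiovascular"),
   ("vascular", "cardiovascular"),
   ("valve", "cardiovascular"),
   ("aortic", "cardiovascular"),
   ("mitral", "cardiovascular"),
   ("lung", "respiratory"),
   ("respiratory", "respiratory"),
   ("breathing", "respiratory"),
   ("asthma", "respiratory"),
   ("pneumonia", "respiratory"),
   ("bronchitis", "respiratory"),
   ("copd", "respiratory"),
   ("tuberculosis", "respiratory"),
   ("cough", "respiratory"),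
   ("dyspnea", "respiratory"),
   ("shortness of breath", "respiratory"),
   ("pulmonary", "respiratory"),
   ("bronchial", "respiratory"),
   ("chest congestion", "respiratory"),
   ("brain", "neurological"),
   ("nerve", "neurological"),
   ("neurological", "neurological"),
   ("stroke", "neurological"),
   ("seizure", "neurological"),
   ("epilepsy", "neurological"),
   ("migraine", "neurological"),
   ("headache", "neurological"),
   ("dementia", "neurological"),
   ("alzheimer", "neurological"),
   ("parkinson", "neurological"),
   ("multiple sclerosis", "neurological"),
   ("paralysis", "neurological"),
   ("neuropathy", "neurological"),
   ("stomach", "gastrointestinal"),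
   ("intestinal", "gastrointestinal"),
   ("digestive", "gastrointestinal"),
   ("gastro", "gastrointestinal"),
   ("bowel", "gastrointestinal"),
   ("colon", "gastrointestinal"),
   ("diarrhea", "gastrointestinal"),
   ("constipation", "gastrointestinal"),
   ("nausea", "gastrointestinal"),
   ("vomiting", "gastrointestinal"),
   ("ulcer", "gastrointestinal"),
   ("hepatitis", "gastrointestinal"),
   ("liver", "gastrointestinal"),
   ("gallbladder", "gastrointestinal"),
   ("pancreatic", "gastrointestinal"),
   ("bone", "musculoskeletal"),
   ("joint", "musculoskeletal"),
   ("muscle", "musculoskeletal"),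
   ("arthritis", "musculoskeletal"),
   ("fracture", "musculoskeletal"),
   ("osteoporosis", "musculoskeletal"),
   ("back pain", "musculoskeletal"),
   ("spine", "musculoskeletal"),
   ("tendon", "musculoskeletal"),
   ("ligament", "musculoskeletal"),
   ("rheumatoid", "musculoskeletal"),
   ("fibromyalgia", "musculoskeletal"),
   ("muscular", "musculoskeletal"),
   ("diabetes", "endocrine"),
   ("thyroid", "endocrine"),
   ("hormone", "endocrine"),
   ("insulin", "endocrine"),
   ("glucose", "endocrine"),
   ("metabolic", "endocrine"),
   ("endocrine", "endocrine"),
   ("adrenal", "endocrine"),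
   ("pituitary", "endocrine"),
   ("hypoglycemia", "endocrine"),
   ("hyperglycemia", "endocrine"),
   ("infection", "infectious"),
   ("bacterial", "infectious"),
   ("viral", "infectious"),
   ("fungal", "infectious"),
   ("flu", "infectious"),
   ("influenza", "infectious"),
   ("cold", "infectious"),
   ("fever", "infectious"),
   ("sepsis", "infectious"),
   ("pneumonia", "infectious"),
   ("meningitis", "infectious"),
   ("malaria", "infectious"),
   ("skin", "dermatological"),
   ("rash", "dermatological"),
   ("dermatitis", "dermatological"),
   ("eczema", "dermatological"),
   ("psoriasis", "dermatological"),
   ("acne", "dermatological"),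
   ("burn", "dermatological"),
   ("wound", "dermatological"),
   ("ulcer", "dermatological"),
   ("melanoma", "dermatological"),
   ("dermatological", "dermatological"),
   ("depression", "psychiatric"),
   ("anxiety", "psychiatric"),
   ("bipolar", "psychiatric"),
   ("schizophrenia", "psychiatric"),
   ("ptsd", "psychiatric"),
   ("panic", "psychiatric"),
   ("psychiatric", "psychiatric"),
   ("mental health", "psychiatric"),
   ("mood disorder", "psychiatric"),
   ("kidney", "genitourinary"),
   ("bladder", "genitourinary"),
   ("urinary", "genitourinary"),
   ("renal", "genitourinary"),
   ("prostate", "genitourinary"),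
   ("urethral", "genitourinary"),
   ("incontinence", "genitourinary"),
   ("uti", "genitourinary"),
   ("nephritis", "genitourinary"),
   ("cystitis", "genitourinary"),
   ("pregnancy", "reproductive"),
   ("menstrual", "reproductive"),
   ("ovarian", "reproductive"),
   ("uterine", "reproductive"),
   ("breast", "reproductive"),
   ("reproductive", "reproductive"),
   ("gynecological", "reproductive"),
   ("erectile", "reproductive"),
   ("fertility", "reproductive"),
   ("eye", "ophthalmologic"),
   ("vision", "ophthalmologic"),
   ("glaucoma", "ophthalmologic"),
   ("cataract", "ophthalmologic"),
   ("retinal", "ophthalmologic"),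
   ("optic", "ophthalmologic"),
   ("blindness", "ophthalmologic"),
   ("ophthalmologic", "ophthalmologic"),
   ("visual", "ophthalmologic"),
   ("ear", "otolaryngologic"),
   ("nose", "otolaryngologic"),
   ("throat", "otolaryngologic"),
   ("hearing", "otolaryngologic"),
   ("tinnitus", "otolaryngologic"),
   ("sinusitis", "otolaryngologic"),
   ("otitis", "otolaryngologic"),
   ("laryngitis", "otolaryngologic"),
   ("pharyngitis", "otolaryngologic")]

-- _category: first pair whose keyword occurs in the (already lowercased) name, else 'other'
def categoryOf (nameLower : String) : String :=
  match keywordPairs.find? (fun q => PySem.Str.isIn q.1 nameLower) with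
  | some q => q.2
  | none => "other"

def sort_classes_by_body_system_alt (unique_labels : List Int) (class_names : List String) : List Int :=
  let pairs := unique_labels.map (fun label =>
    let nameLower := PySem.Str.lower (PySem.List.pyGetD class_names label "")
    (categoryOf nameLower, (nameLower, label)))
  let buckets := pairs.foldl (fun d p => d.modify p.1 [] (fun v => v ++ [p.2]))
    (PySem.Dict.empty : PySem.Dict String (List (String × Int)))
  (PySem.List.sorted (PySem.Dict.keys buckets) (fun c => c)).foldl
    (fun out c => out ++ (PySem.List.sorted (buckets.getD c []) (fun p => p.1)).map (fun p => p.2)) []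

-- ===== PRECONDITION & SPEC =====
-- Pre_ excludes exactly the inputs where A raises IndexError: a label out of Python's index range
def Pre_sort_classes_by_body_system (unique_labels : List Int) (class_names : List String) : Prop :=
  ∀ l ∈ unique_labels, PySem.Raise.InRange class_names.length l
instance (unique_labels : List Int) (class_names : List String) : Decidable (Pre_sort_classes_by_body_system unique_labels class_names) := by unfold Pre_sort_classes_by_body_system; infer_instance

def pvWitness_sort_classes_by_body_system : List Int × List String :=
  ([0, 2, 1, -1], ["flu season", "Heart Attack", "eye pain"])

def Spec_sort_classes_by_body_system (unique_labels : List Int) (class_names : List String) (out : List Int) : Prop := out = sort_classes_by_body_system_alt unique_labels class_names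
instance (unique_labels : List Int) (class_names : List String) (out : List Int) : Decidable (Spec_sort_classes_by_body_system unique_labels class_names out) := by unfold Spec_sort_classes_by_body_system; infer_instance

-- ===== CLAIM (what is proved, stated in full; the proofs are below) =====
def Claim_equal_sort_classes_by_body_system : Prop := ∀ (unique_labels : List Int) (class_names : List String), Dom_sort_classes_by_body_system unique_labels class_names → Pre_sort_classes_by_body_system unique_labels class_names → Spec_sort_classes_by_body_system unique_labels class_names (sort_classes_by_body_system unique_labels class_names)

-- ===== LEMMAS AND PROOFS =====

-- the flat scan list is the category-major flattening of A's nested table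
theorem keywordPairs_flat :
    keywordPairs = systemCategories.flatMap (fun p => p.2.map (fun kw => (kw, p.1))) := by
  rfl

-- first match over a category-major flattening = nested first match
theorem find?_flatMap_pairs {α β : Type} (pred : α → Bool) (t : List (β × List α)) :
    ((t.flatMap (fun p => p.2.map (fun kw => (kw, p.1)))).find?
        (fun q => pred q.1)).map (fun q => q.2) =
      (t.find? (fun p => p.2.any pred)).map (fun p => p.1) := by
  induction t with
  | nil => rfl
  | cons p t ih =>
    rw [List.flatMap_cons, List.find?_append, List.find?_map]
    have hc : ((fun q : α × β => pred q.1) ∘ fun kw => ((kw : α), p.1)) = pred := rfl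
    by_cases h : p.2.any pred = true
    · rw [show List.find? (fun p => p.2.any pred) (p :: t) = some p from
        List.find?_cons_of_pos h, hc]
      obtain ⟨kw, hk⟩ := Option.isSome_iff_exists.mp (List.find?_isSome.mpr (by
        obtain ⟨a, ha, hpa⟩ := List.any_eq_true.mp h
        exact ⟨a, ha, hpa⟩))
      rw [hk]
      rfl
    · have hn : p.2.find? pred = none := List.find?_eq_none.mpr (by
        intro a ha
        simp only [List.any_eq_true, not_exists, not_and] at h
        simp [h a ha])
      rw [show List.find? (fun p => p.2.any pred) (p :: t) =
          List.find? (fun p => p.2.any pred) t from List.find?_cons_of_neg (by simp [h]),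
        hc, hn]
      simpa using ih

-- B's flat scan computes A's nested categorization
@[simp] theorem categoryOf_eq (name : String) :
    categoryOf (PySem.Str.lower name) = categorizeCondition name := by
  have h := find?_flatMap_pairs
    (fun kw => PySem.Str.isIn kw (PySem.Str.lower name)) systemCategories
  unfold categoryOf categorizeCondition
  rw [keywordPairs_flat]
  cases hA : systemCategories.find?
      (fun p => p.2.any (fun kw => PySem.Str.isIn kw (PySem.Str.lower name))) with
  | none =>
    rw [hA, Option.map_none, Option.map_eq_none_iff] at h
    simp only [h, hA]
  | some p =>
    rw [hA, Option.map_some, Option.map_eq_some_iff] at h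
    obtain ⟨q, hq, hq2⟩ := h
    simp only [hq, hA, hq2]

-- insertBy is unchanged by replacing the test pointwise on the list
theorem insertBy_congr_mem {α : Type} (b1 b2 : α → α → Bool) (x : α) (ys : List α)
    (h : ∀ y ∈ ys, b1 x y = b2 x y) :
    PySem.List.insertBy b1 x ys = PySem.List.insertBy b2 x ys := by
  induction ys with
  | nil => rfl
  | cons y ys ih =>
    simp only [PySem.List.insertBy]
    rw [h y (List.mem_cons_self), ih (fun z hz => h z (List.mem_cons_of_mem _ hz))]

-- if the test accepts every element of zs, insertion into ys ++ zs stays in ys (or just before zs)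
theorem insertBy_append_of_all_before {α : Type} (b : α → α → Bool) (x : α) (ys zs : List α)
    (h : ∀ z ∈ zs, b x z = true) :
    PySem.List.insertBy b x (ys ++ zs) = PySem.List.insertBy b x ys ++ zs := by
  induction ys with
  | nil =>
    cases zs with
    | nil => rfl
    | cons z zs => simp [PySem.List.insertBy, h z (List.mem_cons_self)]
  | cons y ys ih =>
    simp only [List.cons_append, PySem.List.insertBy]
    by_cases hb : b x y = true
    · simp [hb]
    · simp only [hb]; simp only [Bool.false_eq_true, if_false, ih, List.cons_append]

-- if the test rejects every element of ys, insertion into ys ++ zs happens in zs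
theorem insertBy_append_of_all_not_before {α : Type} (b : α → α → Bool) (x : α) (ys zs : List α)
    (h : ∀ y ∈ ys, b x y = false) :
    PySem.List.insertBy b x (ys ++ zs) = ys ++ PySem.List.insertBy b x zs := by
  induction ys with
  | nil => rfl
  | cons y ys ih =>
    simp only [List.cons_append, PySem.List.insertBy, h y (List.mem_cons_self),
      Bool.false_eq_true, if_false]
    rw [ih (fun z hz => h z (List.mem_cons_of_mem _ hz))]

-- insertBy commutes with map when the tests correspond
theorem insertBy_map {α β : Type} (f : α → β) (bf : β → β → Bool) (b : α → α → Bool)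
    (hc : ∀ a a', bf (f a) (f a') = b a a') (x : α) (ys : List α) :
    PySem.List.insertBy bf (f x) (ys.map f) = (PySem.List.insertBy b x ys).map f := by
  induction ys with
  | nil => rfl
  | cons y ys ih =>
    simp only [List.map_cons, PySem.List.insertBy, hc x y]
    by_cases hb : b x y = true
    · simp [hb]
    · simp only [hb]; simp [ih]

-- sorted commutes with map when the key factors through the map
theorem sorted_map_of_key {α β : Type} (f : α → β) (key : β → String) (ys : List α) :
    PySem.List.sorted (ys.map f) key = (PySem.List.sorted ys (fun a => key (f a))).map f := by
  simp only [PySem.List.sorted]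
  induction ys using List.reverseRecOn with
  | nil => rfl
  | append_singleton ys x ih =>
    simp only [List.map_append, List.map_singleton, List.foldl_append, List.foldl_cons,
      List.foldl_nil, ih]
    exact insertBy_map f _ _ (fun a a' => rfl) x _

-- if the test accepts every element, x lands at the front
theorem insertBy_of_all_before {α : Type} (b : α → α → Bool) (x : α) (l : List α)
    (h : ∀ y ∈ l, b x y = true) :
    PySem.List.insertBy b x l = x :: l := by
  cases l with
  | nil => rfl
  | cons y ys => simp [PySem.List.insertBy, h y List.mem_cons_self]

-- the composite insertion-sort step distributes over a category-bucketed list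
theorem insertBy_flatMap {α : Type} (k1 k2 : α → String) (x : α) (S : List String)
    (G : String → List α) (hS : S.Pairwise (· < ·)) (hG : ∀ c ∈ S, ∀ a ∈ G c, k1 a = c) :
    PySem.List.insertBy
        (fun a b => decide (k1 a < k1 b) || !decide (k1 b < k1 a) && decide (k2 a < k2 b)) x
        (S.flatMap G) =
      if k1 x ∈ S then
        S.flatMap (fun c => if c = k1 x then
          PySem.List.insertBy (fun a b => decide (k2 a < k2 b)) x (G c) else G c)
      else
        (PySem.List.insertBy (fun a b => decide (a < b)) (k1 x) S).flatMap
          (fun c => if c = k1 x then [x] else G c) := by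
  induction S with
  | nil => simp [PySem.List.insertBy]
  | cons c S ih =>
    have hcS : ∀ c' ∈ S, c < c' := fun c' h => List.rel_of_pairwise_cons hS h
    have hGc : ∀ a ∈ G c, k1 a = c := hG c List.mem_cons_self
    have hGS : ∀ c' ∈ S, ∀ a ∈ G c', k1 a = c' := fun c' h => hG c' (List.mem_cons_of_mem _ h)
    have hflat : ∀ a ∈ S.flatMap G, ∃ c' ∈ S, k1 a = c' := by
      intro a ha
      obtain ⟨c', hc', haG⟩ := List.mem_flatMap.mp ha
      exact ⟨c', hc', hGS c' hc' a haG⟩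
    rcases lt_trichotomy (k1 x) c with hlt | heq | hgt
    · -- new category strictly before c: x goes to the very front
      have hnm : k1 x ∉ c :: S := by
        intro hm
        rcases List.mem_cons.mp hm with h | h
        · exact absurd h (ne_of_lt hlt)
        · exact absurd rfl (ne_of_lt (lt_trans hlt (hcS _ h))).symm
      rw [if_neg hnm, List.flatMap_cons,
        insertBy_of_all_before _ x _ (by
          intro y hy
          rcases List.mem_append.mp hy with h | h
          · simp [hGc y h, hlt]
          · obtain ⟨c', hc', hk⟩ := hflat y h
            simp [hk, lt_trans hlt (hcS _ hc')])]
      have hins : PySem.List.insertBy (fun a b => decide (a < b)) (k1 x) (c :: S) =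
          k1 x :: c :: S := by simp [PySem.List.insertBy, hlt]
      rw [hins, List.flatMap_cons, List.flatMap_cons, if_pos rfl]
      have h1 : (if c = k1 x then [x] else G c) = G c := if_neg (ne_of_gt hlt)
      rw [h1, List.flatMap_congr (l := S)
        (g := G) (fun c' hc' => if_neg (ne_of_gt (lt_trans hlt (hcS _ hc'))))]
      simp
    · -- same category as c: insert inside c's bucket by the name key alone
      have hm : k1 x ∈ c :: S := by rw [heq]; exact List.mem_cons_self
      rw [if_pos hm, List.flatMap_cons, List.flatMap_cons,
        insertBy_append_of_all_before _ x _ _ (by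
          intro y hy
          obtain ⟨c', hc', hk⟩ := hflat y hy
          simp [hk, heq ▸ hcS _ hc']),
        insertBy_congr_mem _ (fun a b => decide (k2 a < k2 b)) x (G c) (by
          intro y hy
          have hky : k1 y = k1 x := (hGc y hy).trans heq.symm
          simp [hky]),
        if_pos heq.symm,
        List.flatMap_congr (l := S) (g := G)
          (fun c' hc' => if_neg (heq ▸ ne_of_gt (hcS _ hc')))]
    · -- category after c: skip c's bucket entirely and recurse
      have hne : k1 x ≠ c := ne_of_gt hgt
      rw [List.flatMap_cons,
        insertBy_append_of_all_not_before _ x _ _ (by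
          intro y hy
          simp [hGc y hy, hgt, not_lt.mpr (le_of_lt hgt)]),
        ih hS.of_cons hGS]
      by_cases hmem : k1 x ∈ S
      · rw [if_pos hmem, if_pos (List.mem_cons_of_mem _ hmem), List.flatMap_cons,
          if_neg (Ne.symm hne)]
      · have hnm : k1 x ∉ c :: S := by
          intro h; rcases List.mem_cons.mp h with h | h
          · exact hne h
          · exact hmem h
        rw [if_neg hmem, if_neg hnm]
        have hins : PySem.List.insertBy (fun a b => decide (a < b)) (k1 x) (c :: S) =
            c :: PySem.List.insertBy (fun a b => decide (a < b)) (k1 x) S := by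
          simp [PySem.List.insertBy, not_lt.mpr (le_of_lt hgt)]
        rw [hins, List.flatMap_cons, if_neg (Ne.symm hne)]

-- right-step recurrences of the insertion sorts
theorem sorted_append_singleton {α : Type} (key : α → String) (xs : List α) (x : α) :
    PySem.List.sorted (xs ++ [x]) key =
      PySem.List.insertBy (fun a b => decide (key a < key b)) x (PySem.List.sorted xs key) := by
  simp [PySem.List.sorted, List.foldl_append]

theorem sorted2_append_singleton {α : Type} (k1 k2 : α → String) (xs : List α) (x : α) :
    PySem.List.sorted2 (xs ++ [x]) k1 k2 =
      PySem.List.insertBy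
        (fun a b => decide (k1 a < k1 b) || !decide (k1 b < k1 a) && decide (k2 a < k2 b)) x
        (PySem.List.sorted2 xs k1 k2) := by
  simp [PySem.List.sorted2, List.foldl_append]

-- MAIN: the composite-key sort equals sorted-distinct-categories flatMap per-category sorts
theorem sorted2_eq_bucketed {α : Type} (k1 k2 : α → String) (xs : List α) :
    PySem.List.sorted2 xs k1 k2 =
      (PySem.List.sorted (PySem.Set.ofList (xs.map k1)) (fun c => c)).flatMap
        (fun c => PySem.List.sorted (xs.filter (fun a => k1 a == c)) k2) := by
  induction xs using List.reverseRecOn with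
  | nil => rfl
  | append_singleton xs x ih =>
    have hS : (PySem.List.sorted (PySem.Set.ofList (xs.map k1)) (fun c => c)).Pairwise (· < ·) :=
      PySem.List.sorted_ofList_pairwise_lt _
    have hG : ∀ c ∈ PySem.List.sorted (PySem.Set.ofList (xs.map k1)) (fun c => c),
        ∀ a ∈ PySem.List.sorted (xs.filter (fun a => k1 a == c)) k2, k1 a = c := by
      intro c _ a ha
      have hmem := (PySem.List.mem_sorted _ _ _ _).mp ha
      exact beq_iff_eq.mp (List.mem_filter.mp hmem).2
    rw [sorted2_append_singleton, ih, insertBy_flatMap k1 k2 x _ _ hS hG,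
      List.map_append, List.map_singleton, PySem.Set.ofList_append_singleton]
    by_cases hmem : k1 x ∈ xs.map k1
    · have hmemS : k1 x ∈ PySem.List.sorted (PySem.Set.ofList (xs.map k1)) (fun c => c) :=
        (PySem.List.mem_sorted _ _ _ _).mpr ((PySem.Set.mem_ofList _ _).mpr hmem)
      rw [if_pos hmemS, PySem.Set.add_of_mem ((PySem.Set.mem_ofList _ _).mpr hmem)]
      refine List.flatMap_congr ?_
      intro c hc
      by_cases hc' : c = k1 x
      · subst hc'
        rw [if_pos rfl, List.filter_append]
        have hfx : [x].filter (fun a => k1 a == k1 x) = [x] := by simp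
        rw [hfx, sorted_append_singleton]
      · rw [if_neg hc', List.filter_append]
        have hfx : [x].filter (fun a => k1 a == c) = [] := by
          simp [Ne.symm hc']
        rw [hfx, List.append_nil]
    · have hmemS : k1 x ∉ PySem.List.sorted (PySem.Set.ofList (xs.map k1)) (fun c => c) := by
        intro h
        exact hmem ((PySem.Set.mem_ofList _ _).mp ((PySem.List.mem_sorted _ _ _ _).mp h))
      rw [if_neg hmemS, PySem.Set.add_of_not_mem (fun h => hmem ((PySem.Set.mem_ofList _ _).mp h)),
        sorted_append_singleton]
      refine List.flatMap_congr ?_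
      intro c hc
      rcases (PySem.List.mem_insertBy _ _ _ _).mp hc with hc' | hc'
      · subst hc'
        rw [if_pos rfl, List.filter_append]
        have h0 : xs.filter (fun a => k1 a == k1 x) = [] := by
          rw [List.filter_eq_nil_iff]
          intro a ha hba
          exact hmem (beq_iff_eq.mp hba ▸ List.mem_map_of_mem ha)
        have hfx : [x].filter (fun a => k1 a == k1 x) = [x] := by simp
        rw [h0, hfx, List.nil_append]
        rfl
      · have hne : c ≠ k1 x := by
          intro h
          exact hmem (h ▸ (PySem.Set.mem_ofList _ _).mp ((PySem.List.mem_sorted _ _ _ _).mp hc'))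
        rw [if_neg hne, List.filter_append]
        have hfx : [x].filter (fun a => k1 a == c) = [] := by
          simp [Ne.symm hne]
        rw [hfx, List.append_nil]

-- ===== VERDICT (by name: the statement is the Claim_ definition above) =====
theorem sort_classes_by_body_system_spec : Claim_equal_sort_classes_by_body_system := by
  intro unique_labels class_names _ _
  unfold Spec_sort_classes_by_body_system
  unfold sort_classes_by_body_system sort_classes_by_body_system_alt
  simp only [categoryOf_eq, PySem.Dict.keys_foldl_modify_key, PySem.Dict.keys_empty,
    PySem.Set.update_nil_left,
    PySem.Dict.getD_foldl_modify_append, PySem.Dict.getD_empty,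
    PySem.List.foldl_append_eq_flatMap, List.nil_append,
    sorted2_eq_bucketed, List.map_flatMap]
  refine List.flatMap_congr ?_
  intro c hc
  rw [sorted_map_of_key, List.map_map]
  rfl
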